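-- pv_equiv track=rewrite | github.com/dknowles2/pytboss | pytboss/api.py | _get_codec_key
-- ===== SOURCE A (Python) =====
-- def _get_codec_key(key_bytes: list[int], time_val: int) -> list[int]:
--     """Port of getCodecKey() from JavaScript."""
--     key = key_bytes.copy()  # Make a copy to avoid modifying the original
--     x = []
--     l = time_val
--
--     while len(key) > 1:
--         p = l % len(key)
--         v = key[p]
--         key.pop(p)
--         x.append((v ^ l) & 0xff)
--         l = (l * v + v) & 0xff
--
--     x.append(key[0])
--     return x
-- ===== SOURCE B (Python) =====
-- def _get_codec_key(key_bytes: list[int], time_val: int) -> list[int]: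
--     """Port of getCodecKey() from JavaScript.
--
--     Alternative: an order-statistics segment tree replaces repeated list.pop,
--     finding and deleting the p-th remaining element in O(log n).
--     """
--     n = len(key_bytes)
--
--     def build(lo, hi):  # tree over key_bytes[lo:hi], requires hi > lo
--         if hi - lo == 1:
--             return ('leaf', key_bytes[lo])
--         mid = (lo + hi) // 2
--         return ('node', hi - lo, build(lo, mid), build(mid, hi))
--
--     def count(t):
--         return 1 if t[0] == 'leaf' else t[1]
--
--     def pop(t, p):  # delete p-th remaining element; returns (value, tree or None)
--         if t[0] == 'leaf':
--             return t[1], None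
--         _, c, lt, rt = t
--         cl = count(lt)
--         if p < cl:
--             v, nl = pop(lt, p)
--             return v, (rt if nl is None else ('node', c - 1, nl, rt))
--         v, nr = pop(rt, p - cl)
--         return v, (lt if nr is None else ('node', c - 1, lt, nr))
--
--     tree = build(0, n)
--     x = []
--     l = time_val
--     m = n
--     while m > 1:
--         p = l % m
--         v, tree = pop(tree, p)
--         x.append((v ^ l) & 0xff)
--         l = (l * v + v) & 0xff
--         m -= 1
--     v, _ = pop(tree, 0)
--     x.append(v)
--     return x
-- ===== Notes on version B (the rewrite author's own statement) =====
-- stated objective: faster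
-- what changed: Replaced the quadratic repeated list.pop(p) with an order-statistics segment tree that finds and deletes the p-th remaining element in O(log n) per step.
-- outside the precondition, e.g. on _get_codec_key([], 0): A raises IndexError, B raises RecursionError
import Mathlib
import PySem

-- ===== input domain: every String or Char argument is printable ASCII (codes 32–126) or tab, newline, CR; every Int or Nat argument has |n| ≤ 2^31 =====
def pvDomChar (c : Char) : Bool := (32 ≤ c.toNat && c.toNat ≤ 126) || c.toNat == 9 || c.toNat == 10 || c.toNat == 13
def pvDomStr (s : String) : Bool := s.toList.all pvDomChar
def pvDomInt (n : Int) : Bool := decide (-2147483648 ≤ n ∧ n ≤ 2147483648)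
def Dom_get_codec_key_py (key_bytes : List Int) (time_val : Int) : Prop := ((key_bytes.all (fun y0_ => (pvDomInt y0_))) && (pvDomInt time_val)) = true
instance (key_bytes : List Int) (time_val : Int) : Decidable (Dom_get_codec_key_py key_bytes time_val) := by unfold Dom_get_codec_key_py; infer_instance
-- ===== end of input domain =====

-- B replaces A's quadratic repeated positional pop with an order-statistics
-- segment tree (find-and-delete the p-th remaining element in O(log n) per step).


-- ===== PORT A =====
-- A's while loop: pop the (l % len)-th element, append (v ^ l) & 0xff, update l.
def aLoop (key : List Int) (l : Int) (x : List Int) : List Int :=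
  if _h1 : 1 < key.length then
    match h : PySem.List.pop? key (PySem.Int.mod l (key.length : Int)) with
    | some r =>
        aLoop r.2 (PySem.Int.band (l * r.1 + r.1) 255)
          (x ++ [PySem.Int.band (PySem.Int.bxor r.1 l) 255])
    | none => x   -- unreachable: 0 ≤ l % len < len
  else x ++ [PySem.List.pyGetD key 0 0]   -- key[0]; Pre_ excludes key = []
termination_by key.length
decreasing_by have := PySem.List.length_of_pop?_eq_some key h; omega

def get_codec_key_py (key_bytes : List Int) (time_val : Int) : List Int :=
  aLoop key_bytes time_val []

-- ===== PORT B =====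
-- Source B's tuple trees ('leaf', v) / ('node', c, l, r) become an inductive type.
inductive KTree where
  | leaf : Int → KTree
  | node : Nat → KTree → KTree → KTree
deriving Repr, DecidableEq

def ktCount : KTree → Nat
  | .leaf _ => 1
  | .node c _ _ => c

-- Source B's build(lo, hi) over key_bytes[lo:hi]; the slice is passed directly.
def buildT (xs : List Int) : KTree :=
  if _h : xs.length ≤ 1 then .leaf (xs.headD 0)   -- headD 0 totalizes xs = [] (Source B never terminates there; outside Pre_)
  else
    let m := xs.length / 2
    .node xs.length (buildT (xs.take m)) (buildT (xs.drop m))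
termination_by xs.length
decreasing_by all_goals simp; omega

def popT : KTree → Nat → Int × Option KTree
  | .leaf v, _ => (v, none)
  | .node c lt rt, p =>
    let cl := ktCount lt
    if p < cl then
      let r := popT lt p
      (r.1, some (match r.2 with | none => rt | some nl => .node (c - 1) nl rt))
    else
      let r := popT rt (p - cl)
      (r.1, some (match r.2 with | none => lt | some nr => .node (c - 1) lt nr))

def bLoop (t : KTree) (l : Int) (x : List Int) (m : Nat) : List Int :=
  if 1 < m then
    let p := PySem.Int.mod l (m : Int)
    let r := popT t p.toNat   -- p ≥ 0 since m > 0, so .toNat is exact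
    bLoop (r.2.getD t) (PySem.Int.band (l * r.1 + r.1) 255)
      (x ++ [PySem.Int.band (PySem.Int.bxor r.1 l) 255]) (m - 1)
  else x ++ [(popT t 0).1]
termination_by m

def get_codec_key_py_alt (key_bytes : List Int) (time_val : Int) : List Int :=
  bLoop (buildT key_bytes) time_val [] key_bytes.length

-- ===== PRECONDITION & SPEC =====
-- Pre_ excludes only the empty list, on which A raises IndexError at key[0].
def Pre_get_codec_key_py (key_bytes : List Int) (time_val : Int) : Prop := key_bytes ≠ []
instance (key_bytes : List Int) (time_val : Int) : Decidable (Pre_get_codec_key_py key_bytes time_val) := by unfold Pre_get_codec_key_py; infer_instance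

def pvWitness_get_codec_key_py : List Int × Int := ([7, -3, 200], 12345)

def Spec_get_codec_key_py (key_bytes : List Int) (time_val : Int) (out : List Int) : Prop := out = get_codec_key_py_alt key_bytes time_val
instance (key_bytes : List Int) (time_val : Int) (out : List Int) : Decidable (Spec_get_codec_key_py key_bytes time_val out) := by unfold Spec_get_codec_key_py; infer_instance

-- ===== CLAIM (what is proved, stated in full; the proofs are below) =====
def Claim_equal_get_codec_key_py : Prop := ∀ (key_bytes : List Int) (time_val : Int), Dom_get_codec_key_py key_bytes time_val → Pre_get_codec_key_py key_bytes time_val → Spec_get_codec_key_py key_bytes time_val (get_codec_key_py key_bytes time_val)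

-- ===== LEMMAS AND PROOFS =====

/-- The in-order list of values stored in a tree. -/
def ktList : KTree → List Int
  | .leaf v => [v]
  | .node _ l r => ktList l ++ ktList r

/-- Well-formedness: every node's cached count is the number of its leaves. -/
def ktWF : KTree → Prop
  | .leaf _ => True
  | .node c l r => ktWF l ∧ ktWF r ∧ c = (ktList l).length + (ktList r).length

theorem ktCount_eq {t : KTree} (h : ktWF t) : ktCount t = (ktList t).length := by
  cases t with
  | leaf v => simp [ktCount, ktList]
  | node c l r =>
    obtain ⟨_, _, hc⟩ := h
    simp [ktCount, ktList, hc]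

theorem ktList_len_pos : ∀ (t : KTree), 1 ≤ (ktList t).length := by
  intro t
  induction t with
  | leaf v => simp [ktList]
  | node c l r ihl ihr => simp only [ktList, List.length_append]; omega

theorem buildT_spec (xs : List Int) (hne : xs ≠ []) :
    ktList (buildT xs) = xs ∧ ktWF (buildT xs) := by
  rw [buildT]
  by_cases h1 : xs.length ≤ 1
  · have hlen1 : xs.length = 1 := by
      have := List.length_pos_iff.mpr hne; omega
    obtain ⟨v, hv⟩ : ∃ v, xs = [v] := by
      match xs, hlen1 with | [v], _ => exact ⟨v, rfl⟩
    subst hv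
    simp [ktList, ktWF]
  · simp only [dif_neg h1]
    have hlen : 2 ≤ xs.length := by omega
    have hm1 : 1 ≤ xs.length / 2 := (Nat.one_le_div_iff (by omega)).mpr (by omega)
    have hm2 : xs.length / 2 < xs.length := Nat.div_lt_self (by omega) (by omega)
    have htake := buildT_spec (xs.take (xs.length / 2))
      (List.length_pos_iff.mp (by rw [List.length_take]; omega))
    have hdrop := buildT_spec (xs.drop (xs.length / 2))
      (List.length_pos_iff.mp (by rw [List.length_drop]; omega))
    refine ⟨?_, htake.2, hdrop.2, ?_⟩
    · simp [ktList, htake.1, hdrop.1]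
    · simp only [htake.1, hdrop.1, List.length_take, List.length_drop]
      omega
termination_by xs.length
decreasing_by all_goals simp; omega

theorem popT_spec : ∀ (t : KTree) (p : Nat), ktWF t → p < (ktList t).length →
    (popT t p).1 = (ktList t).getD p 0 ∧
    (((popT t p).2 = none ∧ (ktList t).length = 1) ∨
     (∃ t', (popT t p).2 = some t' ∧ ktWF t' ∧ ktList t' = (ktList t).eraseIdx p ∧ 2 ≤ (ktList t).length)) := by
  intro t
  induction t with
  | leaf v =>
    intro p _ hp
    simp [ktList] at hp
    subst hp
    simp [popT, ktList]
  | node c lt rt ihl ihr =>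
    intro p hwf hp
    obtain ⟨hwl, hwr, hc⟩ := hwf
    have hcl : ktCount lt = (ktList lt).length := ktCount_eq hwl
    have hll : 1 ≤ (ktList lt).length := ktList_len_pos lt
    have hlr : 1 ≤ (ktList rt).length := ktList_len_pos rt
    simp only [ktList, List.length_append] at hp ⊢
    by_cases hside : p < ktCount lt
    · have hp' : p < (ktList lt).length := by omega
      obtain ⟨hv, hrest⟩ := ihl p hwl hp'
      simp only [popT, if_pos hside]
      constructor
      · rw [hv, List.getD_append _ _ _ _ hp']
      · right
        rcases hrest with ⟨hnone, hlen1⟩ | ⟨t', hsome, hwf', hlist', hge2⟩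
        · refine ⟨rt, ?_, hwr, ?_, by omega⟩
          · simp [hnone]
          · have : p = 0 := by omega
            subst this
            rw [List.eraseIdx_append_of_lt_length hp']
            have h0 : (ktList lt).eraseIdx 0 = [] :=
              List.length_eq_zero_iff.mp (by rw [List.length_eraseIdx_of_lt (by omega)]; omega)
            simp [h0]
        · refine ⟨.node (c-1) t' rt, ?_, ⟨hwf', hwr, ?_⟩, ?_, by omega⟩
          · simp [hsome]
          · rw [hlist', List.length_eraseIdx_of_lt hp']; omega
          · simp only [ktList, hlist']
            rw [List.eraseIdx_append_of_lt_length hp']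
    · have hp' : p - ktCount lt < (ktList rt).length := by omega
      obtain ⟨hv, hrest⟩ := ihr (p - ktCount lt) hwr hp'
      simp only [popT, if_neg hside]
      constructor
      · rw [hv, hcl, List.getD_append_right _ _ _ _ (by omega)]
      · right
        rcases hrest with ⟨hnone, hlen1⟩ | ⟨t', hsome, hwf', hlist', hge2⟩
        · refine ⟨lt, ?_, hwl, ?_, by omega⟩
          · simp [hnone]
          · have hpe : p = (ktList lt).length := by omega
            rw [List.eraseIdx_append_of_length_le (by omega)]
            have h0 : (ktList rt).eraseIdx (p - (ktList lt).length) = [] :=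
              List.length_eq_zero_iff.mp (by rw [List.length_eraseIdx_of_lt (by omega)]; omega)
            simp [h0]
        · refine ⟨.node (c-1) lt t', ?_, ⟨hwl, hwf', ?_⟩, ?_, by omega⟩
          · simp [hsome]
          · rw [hlist', List.length_eraseIdx_of_lt hp']; omega
          · simp only [ktList, hlist']
            rw [List.eraseIdx_append_of_length_le (by omega), hcl]

theorem loops_agree : ∀ (n : Nat) (key : List Int) (t : KTree) (l : Int) (x : List Int),
    key.length = n → key ≠ [] → ktWF t → ktList t = key →
    aLoop key l x = bLoop t l x key.length := by
  intro n
  induction n with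
  | zero => intro key _ _ _ hlen hne _ _; simp [List.length_eq_zero_iff] at hlen; exact absurd hlen hne
  | succ n ih =>
    intro key t l x hlen hne hwf hlist
    by_cases h1 : 1 < key.length
    · -- loop step
      have hm : (0:Int) < (key.length : Int) := by exact_mod_cast Nat.zero_lt_of_lt h1
      set p := PySem.Int.mod l (key.length : Int) with hp
      have hp0 : 0 ≤ p := PySem.Int.mod_nonneg l hm
      have hplt : p < (key.length : Int) := PySem.Int.mod_lt l hm
      have hptn : p = ((p.toNat : Nat) : Int) := (Int.toNat_of_nonneg hp0).symm
      have hplen : p.toNat < key.length := by omega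
      have hpop : PySem.List.pop? key p = some (key[p.toNat], key.eraseIdx p.toNat) := by
        conv_lhs => rw [hptn]
        exact PySem.List.pop?_natCast key p.toNat hplen
      -- B side step
      have hplen' : p.toNat < (ktList t).length := by rw [hlist]; exact hplen
      obtain ⟨hv, hrest⟩ := popT_spec t p.toNat hwf hplen'
      rcases hrest with ⟨_, hlen1⟩ | ⟨t', hsome, hwf', hlist', _⟩
      · rw [hlist] at hlen1; omega
      · rw [aLoop]
        rw [dif_pos h1, hpop]
        rw [bLoop, if_pos (by omega : 1 < key.length)]
        simp only [← hp, hsome, Option.getD_some]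
        have hveq : (popT t p.toNat).1 = key[p.toNat] := by
          rw [hv, hlist, List.getD_eq_getElem _ _ hplen]
        rw [hveq]
        have hlist'' : ktList t' = key.eraseIdx p.toNat := by rw [hlist', hlist]
        have hlen' : (key.eraseIdx p.toNat).length = n := by
          rw [List.length_eraseIdx_of_lt hplen]; omega
        have hne' : key.eraseIdx p.toNat ≠ [] := by
          intro hh; rw [hh] at hlen'; simp at hlen'; omega
        have hstep := ih (key.eraseIdx p.toNat) t'
          (PySem.Int.band (l * key[p.toNat] + key[p.toNat]) 255)
          (x ++ [PySem.Int.band (PySem.Int.bxor key[p.toNat] l) 255])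
          hlen' hne' hwf' hlist''
        rw [hstep, hlen']
        congr 1
        omega
    · -- final step: key = [v]
      have hlen1 : key.length = 1 := by
        have := List.length_pos_iff.mpr hne; omega
      obtain ⟨v, hv⟩ : ∃ v, key = [v] := by
        match key, hlen1 with | [v], _ => exact ⟨v, rfl⟩
      subst hv
      rw [aLoop, dif_neg (by simp), bLoop]
      simp only [List.length_singleton, if_neg (by omega : ¬ 1 < 1)]
      have hplt : (0:Nat) < (ktList t).length := by rw [hlist]; simp
      obtain ⟨hv0, _⟩ := popT_spec t 0 hwf hplt
      rw [hv0, hlist]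
      simp [PySem.List.pyGetD_zero]

-- ===== VERDICT (by name: the statement is the Claim_ definition above) =====
theorem get_codec_key_py_spec : Claim_equal_get_codec_key_py := by
  intro key_bytes time_val _ hpre
  unfold Spec_get_codec_key_py get_codec_key_py get_codec_key_py_alt
  obtain ⟨hlist, hwf⟩ := buildT_spec key_bytes hpre
  exact loops_agree key_bytes.length key_bytes (buildT key_bytes) time_val [] rfl hpre hwf hlist
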